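-- pv_equiv track=rewrite | github.com/umu5/Phazed-variant-of-Phase-10- | phazed_group_type.py | valid_run_of_cards
-- ===== SOURCE A (Python) =====
-- VALUE = 0
--
-- def valid_run_of_cards(arg1):
--     """ It takes the list of cards `arg1` and returns True if the the list
--     contains a valid run of cards, otherwise False."""
--
--     index = 0
--     # Assigns the value to index at which first non wild card occccurs.
--     for card in arg1:
--         if card[VALUE] != 'A':
--             break
--         index += 1
--
--     # `group_list` is a list containing all cards of `arg1` except starting
--     # wild cards in a list.
--     group_list = arg1[index:]
--     value_in_str = '234567890JQK234567890JQK'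
--     # Starting index refers to the index in `value_in_str` that corresponds to
--     # first value of a card in `group_list`.
--     starting_index = value_in_str.index(group_list[0][VALUE])
--     # `edited_value_str` corresponds to the sequence of values sliced from
--     # `value_in_str` on the basis of which the cards in `group_list` should
--     # have value to define a valid run.
--     edited_value_str = value_in_str[starting_index:starting_index
--                                     + len(group_list)]
--
--     group_value_str = ''
--     i = 0
--     for card in group_list:
--         # If card from `group_list` has a value `A` then the value is
--         # taken from  `edited_value_str` at same index  and is added to
--         # `group_value_str` instead of taking value from card itself.
--         if card[VALUE] == 'A':
--             group_value_str += edited_value_str[i]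
--         else:
--             group_value_str += card[VALUE]
--         i += 1
--
--     return group_value_str in value_in_str
-- ===== SOURCE B (Python) =====
-- VALUE = 0
--
-- def valid_run_of_cards(arg1):
--     """Valid-run check done card by card: each card must occupy its consecutive
--     slot of the doubled value string (wild cards occupy any slot), instead of
--     concatenating a run string and substring-testing it."""
--     value_in_str = '234567890JQK234567890JQK'
--     index = 0
--     while arg1[index][VALUE] == 'A':
--         index += 1
--     group_list = arg1[index:]
--     base = value_in_str.index(group_list[0][VALUE])
--     return all(card[VALUE] == 'A'
--                or (base + i < len(value_in_str)
--                    and card[VALUE] == value_in_str[base + i])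
--                for i, card in enumerate(group_list))
-- ===== Notes on version B (the rewrite author's own statement) =====
-- stated objective: simpler
-- what changed: B validates the run card by card, requiring each card to be wild or to equal the character at its consecutive slot of the doubled value string, instead of A's two-stage construction of a filled-in run string followed by a substring-membership test.
-- outside the precondition, e.g. on valid_run_of_cards([('23', 'x')]): A returns True, B returns False; on valid_run_of_cards([('2', 'h'), ('', 'h'), ('3', 'h')]): A returns True, B returns False
import Mathlib
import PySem

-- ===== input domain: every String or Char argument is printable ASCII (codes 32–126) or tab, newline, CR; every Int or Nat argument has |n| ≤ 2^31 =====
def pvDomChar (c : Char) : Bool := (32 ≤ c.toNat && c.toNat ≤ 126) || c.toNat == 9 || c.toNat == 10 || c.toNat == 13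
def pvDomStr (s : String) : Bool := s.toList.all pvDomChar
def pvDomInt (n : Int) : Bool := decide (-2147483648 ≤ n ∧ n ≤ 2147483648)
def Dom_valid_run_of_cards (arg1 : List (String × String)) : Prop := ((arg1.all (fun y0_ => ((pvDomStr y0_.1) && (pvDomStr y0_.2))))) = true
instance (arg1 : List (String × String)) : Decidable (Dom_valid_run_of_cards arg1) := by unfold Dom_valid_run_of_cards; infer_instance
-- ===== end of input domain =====

-- B replaces A's "build the wild-filled run string, then substring-test it" by a single
-- per-card pass checking each card against its consecutive slot of the doubled value
-- string (simpler: one comparison per card, no string construction); equivalence proved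
-- on Pre_ (inputs where A returns, restricted to the game's natural card values).


-- the shared constant '234567890JQK234567890JQK' as a char list
def vrocStr : List Char := "234567890JQK234567890JQK".toList

-- ===== PORT A =====
-- the first loop of A: number of leading wild cards
def vrocIndexA : List (String × String) → Int
  | [] => 0
  | c :: t => if c.1 ≠ "A" then 0 else 1 + vrocIndexA t

def valid_run_of_cards (arg1 : List (String × String)) : Bool :=
  let index := vrocIndexA arg1
  let group_list := PySem.List.slice arg1 (some index) none
  let starting_index : Int :=
    PySem.Chars.find vrocStr ((PySem.List.pyGet? group_list 0).getD ("", "")).1.toList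
  let edited_value_str :=
    PySem.List.slice vrocStr (some starting_index)
      (some (starting_index + (group_list.length : Int)))
  let r := group_list.foldl
    (fun (acc : List Char × Int) card =>
      (if card.1 = "A" then acc.1 ++ [(PySem.List.pyGet? edited_value_str acc.2).getD ' ']
       else acc.1 ++ card.1.toList, acc.2 + 1))
    ([], 0)
  PySem.Chars.isIn r.1 vrocStr

-- ===== PORT B =====
-- B's while loop: drop the leading wild cards
def vrocSkip : List (String × String) → List (String × String)
  | [] => []
  | c :: t => if c.1 = "A" then vrocSkip t else c :: t

def valid_run_of_cards_alt (arg1 : List (String × String)) : Bool :=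
  let group_list := vrocSkip arg1
  let base := PySem.Chars.find vrocStr (group_list.headD ("", "")).1.toList
  -- all(card == 'A' or (base+i < 24 and card == s[base+i]) for i, card in enumerate(group))
  group_list.zipIdx.all (fun q =>
    q.1.1 == "A" ||
      (decide (base + (q.2 : Int) < 24) &&
       q.1.1.toList == [(PySem.List.pyGet? vrocStr (base + (q.2 : Int))).getD ' ']))

-- ===== PRECONDITION & SPEC =====
-- the group both programs work on: the input without its leading wild cards
def vrocGroup (arg1 : List (String × String)) : List (String × String) :=
  arg1.dropWhile (fun c => c.1 == "A")

-- Pre_ excludes the inputs on which A raises — all-wild (incl. empty) lists (IndexError on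
-- group_list[0]), a first non-wild value absent from the value string (ValueError from
-- .index), a wild card whose slot falls past the 24-char doubled string (IndexError) — and,
-- a stated natural-domain restriction, inputs carrying a malformed card value that is not a
-- single character yet is itself a substring of the doubled rank string ('' or '23'): there
-- A's concatenation accidentally lets one card fill zero or several run slots and returns a
-- value B does not reproduce (malformed values that are not such substrings, and runs whose
-- total value length exceeds the 24-char string, stay inside Pre_: both return False there).
def Pre_valid_run_of_cards (arg1 : List (String × String)) : Prop :=
  vrocGroup arg1 ≠ [] ∧
  PySem.Chars.isIn ((vrocGroup arg1).headD ("", "")).1.toList vrocStr = true ∧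
  (∀ q ∈ (vrocGroup arg1).zipIdx, q.1.1 = "A" →
    (PySem.Chars.find vrocStr ((vrocGroup arg1).headD ("", "")).1.toList).toNat + q.2 < 24) ∧
  ((∀ c ∈ vrocGroup arg1, c.1.toList.length = 1) ∨
   (∃ q ∈ vrocGroup arg1, q.1 ≠ "A" ∧ PySem.Chars.isIn q.1.toList vrocStr = false) ∨
   24 < ((vrocGroup arg1).map (fun c => if c.1 = "A" then 1 else c.1.toList.length)).sum)
instance (arg1 : List (String × String)) : Decidable (Pre_valid_run_of_cards arg1) := by
  unfold Pre_valid_run_of_cards; infer_instance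

def pvWitness_valid_run_of_cards : (List (String × String)) := [("2", "h"), ("A", "s"), ("4", "d")]

def Spec_valid_run_of_cards (arg1 : List (String × String)) (out : Bool) : Prop := out = valid_run_of_cards_alt arg1
instance (arg1 : List (String × String)) (out : Bool) : Decidable (Spec_valid_run_of_cards arg1 out) := by unfold Spec_valid_run_of_cards; infer_instance

-- ===== CLAIM (what is proved, stated in full; the proofs are below) =====
def Claim_equal_valid_run_of_cards : Prop := ∀ (arg1 : List (String × String)), Dom_valid_run_of_cards arg1 → Pre_valid_run_of_cards arg1 → Spec_valid_run_of_cards arg1 (valid_run_of_cards arg1)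

-- ===== LEMMAS AND PROOFS =====

-- vrocSkip is dropWhile of the wild predicate
theorem vroc_skip_eq (l : List (String × String)) :
    vrocSkip l = l.dropWhile (fun c => c.1 == "A") := by
  induction l with
  | nil => rfl
  | cons c t ih => by_cases h : c.1 = "A" <;> simp [vrocSkip, h, ih]

theorem vroc_indexA_nonneg (l : List (String × String)) : 0 ≤ vrocIndexA l := by
  induction l with
  | nil => simp [vrocIndexA]
  | cons c t ih => simp only [vrocIndexA]; split <;> omega

-- A's slice from the leading-wild count is the same dropWhile
theorem vroc_sliceA_eq (l : List (String × String)) :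
    PySem.List.slice l (some (vrocIndexA l)) none = l.dropWhile (fun c => c.1 == "A") := by
  rw [PySem.List.slice_from _ (vroc_indexA_nonneg l)]
  induction l with
  | nil => rfl
  | cons c t ih =>
    by_cases h : c.1 = "A"
    · have hn := vroc_indexA_nonneg t
      have h0 : vrocIndexA (c :: t) = 1 + vrocIndexA t := by simp [vrocIndexA, h]
      have h1 : (vrocIndexA (c :: t)).toNat = (vrocIndexA t).toNat + 1 := by
        rw [h0]; omega
      rw [h1]
      simp [h, ih]
    · simp [vrocIndexA, h]

-- A's string-building loop produces the concatenation of per-card pieces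
theorem vroc_foldA (edited : List Char) (group : List (String × String)) :
    ∀ (acc : List Char) (k : Nat),
    (group.foldl (fun (a : List Char × Int) card =>
        (if card.1 = "A" then a.1 ++ [(PySem.List.pyGet? edited a.2).getD ' ']
         else a.1 ++ card.1.toList, a.2 + 1)) (acc, (k : Int))).1
    = acc ++ ((group.zipIdx k).map (fun q =>
        if q.1.1 = "A" then [(PySem.List.pyGet? edited ((q.2 : Nat) : Int)).getD ' ']
        else q.1.1.toList)).flatten := by
  induction group with
  | nil => intro acc k; simp
  | cons c t ih =>
    intro acc k
    have hk : (k : Int) + 1 = ((k + 1 : Nat) : Int) := by push_cast; ring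
    simp only [List.foldl_cons, List.zipIdx_cons, List.map_cons, List.flatten_cons]
    by_cases h : c.1 = "A"
    · rw [if_pos h, if_pos h, hk, ih]
      simp [List.append_assoc]
    · rw [if_neg h, if_neg h, hk, ih]
      simp [List.append_assoc]

-- the per-card piece of the run, indexed directly into the doubled value string
def vrocPiece (b : Nat) (q : (String × String) × Nat) : List Char :=
  if q.1.1 = "A" then [(vrocStr[b + q.2]?).getD ' '] else q.1.1.toList

-- the per-card character of the run (single-character card values)
def vrocCh (b : Nat) (q : (String × String) × Nat) : Char :=
  if q.1.1 = "A" then (vrocStr[b + q.2]?).getD ' ' else q.1.1.toList.headD ' '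

-- facts about the literal string '234567890JQK234567890JQK'
theorem vroc_period : ∀ i ∈ List.range 12, vrocStr[i]? = vrocStr[i+12]? := by decide
theorem vroc_mod : ∀ i ∈ List.range 24, ∀ j ∈ List.range 24,
    vrocStr[i]? = vrocStr[j]? → i % 12 = j % 12 := by decide
theorem vroc_len : vrocStr.length = 24 := by decide

theorem vroc_singleton_prefix_iff (c : Char) (l : List Char) : [c] <+: l ↔ l[0]? = some c := by
  cases l with
  | nil => simp
  | cons a t => simp [List.cons_prefix_cons, eq_comm]

theorem vroc_len1_eq (l : List Char) (h : l.length = 1) : l = [l.headD ' '] := by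
  match l, h with
  | [a], _ => rfl

-- prefix of the value string at an offset, characterized pointwise
theorem vroc_prefix_drop_iff (cs : List Char) (k : Nat) (hne : cs ≠ []) :
    cs <+: vrocStr.drop k ↔ (k + cs.length ≤ 24 ∧ ∀ j < cs.length, cs[j]? = vrocStr[k+j]?) := by
  have hlen : 0 < cs.length := List.length_pos_of_ne_nil hne
  rw [List.prefix_iff_eq_take]
  constructor
  · intro h
    have hl := congrArg List.length h
    simp only [List.length_take, List.length_drop, vroc_len] at hl
    constructor
    · omega
    · intro j hj
      rw [h, List.getElem?_take_of_lt hj, List.getElem?_drop]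
  · rintro ⟨hle, hpt⟩
    apply List.ext_getElem?
    intro j
    by_cases hj : j < cs.length
    · rw [hpt j hj, List.getElem?_take_of_lt hj, List.getElem?_drop]
    · rw [List.getElem?_eq_none (by omega), List.getElem?_eq_none]
      simp only [List.length_take, List.length_drop, vroc_len]
      omega

-- the heart: a nonempty string whose first character first occurs at b in the value
-- string is a substring iff it matches the window starting at b
theorem vroc_main (cs : List Char) (v0 : Char) (b : Nat) (hne : cs ≠ [])
    (h0 : cs[0]? = some v0)
    (hfind : PySem.Chars.find vrocStr [v0] = (b : Int)) :
    PySem.Chars.isIn cs vrocStr = true ↔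
      (b + cs.length ≤ 24 ∧ ∀ j < cs.length, cs[j]? = vrocStr[b+j]?) := by
  have hlen : 0 < cs.length := List.length_pos_of_ne_nil hne
  have hnn : 0 ≤ PySem.Chars.find vrocStr [v0] := by rw [hfind]; positivity
  obtain ⟨hpref, hmin⟩ := PySem.Chars.find_spec (s := vrocStr) (sub := [v0]) hnn
  rw [hfind] at hpref hmin
  simp only [Int.toNat_natCast] at hpref hmin
  have hsb : vrocStr[b]? = some v0 := by
    have := (vroc_singleton_prefix_iff v0 _).mp hpref
    rwa [List.getElem?_drop, Nat.add_zero] at this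
  have hb24 : b < 24 := by
    by_contra h
    rw [List.getElem?_eq_none (by simp [vroc_len]; omega)] at hsb
    simp at hsb
  have hb12 : b < 12 := by
    by_contra h
    have hper := vroc_period (b - 12) (List.mem_range.mpr (by omega))
    rw [show b - 12 + 12 = b from by omega] at hper
    have h1 : vrocStr[b-12]? = some v0 := hper.trans hsb
    exact hmin (b - 12) (by omega)
      ((vroc_singleton_prefix_iff v0 _).mpr
        (by rwa [List.getElem?_drop, Nat.add_zero]))
  constructor
  · intro h
    rw [← PySem.Chars.exists_prefix_drop_iff_isIn] at h
    obtain ⟨j, hj⟩ := h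
    obtain ⟨hjle, hjpt⟩ := (vroc_prefix_drop_iff cs j hne).mp hj
    have hsj : vrocStr[j]? = some v0 := by rw [← Nat.add_zero j, ← hjpt 0 hlen, h0]
    have hmod := vroc_mod j (List.mem_range.mpr (by omega)) b (List.mem_range.mpr hb24)
      (hsj.trans hsb.symm)
    have hcase : j = b ∨ j = b + 12 := by omega
    rcases hcase with rfl | rfl
    · exact ⟨hjle, hjpt⟩
    · refine ⟨by omega, fun k hk => ?_⟩
      have hper := vroc_period (b + k) (List.mem_range.mpr (by omega))
      rw [hjpt k hk, show b + 12 + k = b + k + 12 from by omega, hper]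
  · rintro ⟨hle, hpt⟩
    rw [← PySem.Chars.exists_prefix_drop_iff_isIn]
    exact ⟨b, (vroc_prefix_drop_iff cs b hne).mpr ⟨hle, hpt⟩⟩

-- A's result is the substring test of the flattened per-card pieces
theorem vroc_A_eq (arg1 : List (String × String))
    (hne : vrocGroup arg1 ≠ [])
    (hfnn : 0 ≤ PySem.Chars.find vrocStr ((vrocGroup arg1).headD ("", "")).1.toList) :
    valid_run_of_cards arg1 =
      PySem.Chars.isIn
        (((vrocGroup arg1).zipIdx.map
          (vrocPiece (PySem.Chars.find vrocStr ((vrocGroup arg1).headD ("", "")).1.toList).toNat)).flatten)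
        vrocStr := by
  simp only [valid_run_of_cards]
  rw [vroc_sliceA_eq arg1]
  have hgd : arg1.dropWhile (fun c => c.1 == "A") = vrocGroup arg1 := rfl
  rw [hgd]
  cases hgc : vrocGroup arg1 with
  | nil => exact absurd hgc hne
  | cons c0 t =>
  rw [hgc] at hfnn
  have hfnn' : 0 ≤ PySem.Chars.find vrocStr c0.1.toList := hfnn
  have hhead : (PySem.List.pyGet? (c0 :: t) (0 : Int)).getD ("", "") = c0 := by
    simp [PySem.List.pyGet?, PySem.List.pyIdx?]
  have hheadD : (c0 :: t).headD ("", "") = c0 := rfl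
  rw [hhead, hheadD]
  have hfold := vroc_foldA
    (PySem.List.slice vrocStr (some (PySem.Chars.find vrocStr c0.1.toList))
      (some (PySem.Chars.find vrocStr c0.1.toList + ((c0 :: t).length : Int))))
    (c0 :: t) [] 0
  simp only [Nat.cast_zero, List.nil_append] at hfold
  rw [hfold]
  congr 1
  apply congrArg List.flatten
  apply List.map_congr_left
  intro q hq
  unfold vrocPiece
  by_cases hw : q.1.1 = "A"
  · rw [if_pos hw, if_pos hw]
    have hlt : q.2 < (c0 :: t).length := by
      have := List.snd_lt_of_mem_zipIdx hq
      omega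
    congr 2
    rw [PySem.List.slice_toNat _ hfnn' (by positivity)]
    have h2 : (PySem.Chars.find vrocStr c0.1.toList + ((c0 :: t).length : Int)).toNat
        - (PySem.Chars.find vrocStr c0.1.toList).toNat = (c0 :: t).length := by omega
    rw [h2, PySem.List.pyGet?_natCast, List.getElem?_take_of_lt hlt, List.getElem?_drop]
  · rw [if_neg hw, if_neg hw]

-- singleton pieces flatten to the per-card characters
theorem vroc_fst_mem {group : List (String × String)} {q : (String × String) × Nat}
    (hq : q ∈ group.zipIdx) : q.1 ∈ group := by
  obtain ⟨h1, h2, h3⟩ := List.mem_zipIdx hq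
  rw [h3]
  exact List.getElem_mem _

theorem vroc_pieces_flatten (b : Nat) (group : List (String × String))
    (hlen1 : ∀ c ∈ group, c.1.toList.length = 1) :
    ((group.zipIdx.map (vrocPiece b)).flatten) = group.zipIdx.map (vrocCh b) := by
  have hpc : ∀ q ∈ group.zipIdx, vrocPiece b q = [vrocCh b q] := by
    intro q hq
    unfold vrocPiece vrocCh
    by_cases hw : q.1.1 = "A"
    · rw [if_pos hw, if_pos hw]
    · rw [if_neg hw, if_neg hw]
      exact vroc_len1_eq _ (hlen1 q.1 (vroc_fst_mem hq))
  rw [List.map_congr_left hpc]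
  induction group.zipIdx with
  | nil => rfl
  | cons a t ih => simp only [List.map_cons, List.flatten_cons, ih, List.singleton_append]

-- B's per-card pass, characterized pointwise against the window at b
theorem vroc_B_iff (group : List (String × String)) (b : Nat)
    (hne : group ≠ [])
    (hwild : ∀ q ∈ group.zipIdx, q.1.1 = "A" → b + q.2 < 24)
    (hlen1 : ∀ c ∈ group, c.1.toList.length = 1) :
    (group.zipIdx.all (fun q =>
      q.1.1 == "A" ||
        (decide ((b : Int) + (q.2 : Int) < 24) &&
         q.1.1.toList == [(PySem.List.pyGet? vrocStr ((b : Int) + (q.2 : Int))).getD ' ']))) = true ↔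
      (b + group.length ≤ 24 ∧
       ∀ j < group.length, (group.zipIdx.map (vrocCh b))[j]? = vrocStr[b+j]?) := by
  have hget : ∀ i : Nat, PySem.List.pyGet? vrocStr ((b : Int) + (i : Int)) = vrocStr[b+i]? := by
    intro i
    rw [show (b : Int) + (i : Int) = ((b + i : Nat) : Int) from by push_cast; ring,
        PySem.List.pyGet?_natCast]
  have hsome : ∀ i : Nat, b + i < 24 → vrocStr[b+i]? = some ((vrocStr[b+i]?).getD ' ') := by
    intro i hi
    rw [List.getElem?_eq_getElem (by simp [vroc_len]; omega)]
    rfl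
  have hcs : ∀ j (hj : j < group.length),
      (group.zipIdx.map (vrocCh b))[j]? = some (vrocCh b (group[j], j)) := by
    intro j hj
    rw [List.getElem?_map, List.getElem?_zipIdx, List.getElem?_eq_getElem hj]
    simp
  rw [List.all_eq_true]
  constructor
  · intro hB
    have hmem : ∀ j (hj : j < group.length), (group[j], j) ∈ group.zipIdx := by
      intro j hj
      rw [List.mk_mem_zipIdx_iff_getElem?, List.getElem?_eq_getElem hj]
    have hbj : ∀ j (hj : j < group.length), b + j < 24 := by
      intro j hj
      by_cases hw : (group[j] : String × String).1 = "A"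
      · exact hwild _ (hmem j hj) hw
      · have := hB _ (hmem j hj)
        simp only [hw, beq_iff_eq, Bool.or_eq_true, Bool.and_eq_true, decide_eq_true_eq] at this
        rcases this with h | ⟨h, _⟩
        · exact h.elim
        · omega
    have hn : 0 < group.length := List.length_pos_of_ne_nil hne
    refine ⟨by have := hbj (group.length - 1) (by omega); omega, fun j hj => ?_⟩
    rw [hcs j hj, hsome j (hbj j hj)]
    congr 1
    unfold vrocCh
    by_cases hw : (group[j] : String × String).1 = "A"
    · rw [if_pos hw]
    · rw [if_neg hw]
      have := hB _ (hmem j hj)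
      simp only [hw, beq_iff_eq, Bool.or_eq_true, Bool.and_eq_true, decide_eq_true_eq] at this
      rcases this with h | ⟨_, h⟩
      · exact h.elim
      · rw [hget j] at h
        rw [h]
        rfl
  · rintro ⟨hle, hpt⟩ q hq
    obtain ⟨card, i⟩ := q
    have hgi : group[i]? = some card := List.mk_mem_zipIdx_iff_getElem?.mp hq
    have hi : i < group.length := (List.getElem?_eq_some_iff.mp hgi).1
    have hci : group[i] = card := (List.getElem?_eq_some_iff.mp hgi).2
    by_cases hw : card.1 = "A"
    · simp [hw]
    · have hx := hpt i hi
      rw [hcs i hi, hsome i (by omega)] at hx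
      have hchar : vrocCh b (group[i], i) = (vrocStr[b+i]?).getD ' ' :=
        Option.some_injective _ hx
      unfold vrocCh at hchar
      rw [hci, if_neg hw] at hchar
      have hlist : card.1.toList = [(vrocStr[b+i]?).getD ' '] := by
        rw [← hchar]
        exact vroc_len1_eq _ (hlen1 card (vroc_fst_mem hq))
      simp only [hw, beq_iff_eq, Bool.or_eq_true, Bool.and_eq_true, decide_eq_true_eq]
      right
      refine ⟨by omega, ?_⟩
      rw [hget i]
      exact hlist

-- ===== VERDICT (by name: the statement is the Claim_ definition above) =====
theorem valid_run_of_cards_spec : Claim_equal_valid_run_of_cards := by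
  intro arg1 _ hpre
  unfold Spec_valid_run_of_cards
  obtain ⟨hne, hisin, hwild, hforms⟩ := hpre
  have hfnn : 0 ≤ PySem.Chars.find vrocStr ((vrocGroup arg1).headD ("", "")).1.toList :=
    (PySem.Chars.find_nonneg_iff _ _).mpr ((PySem.Chars.isIn_iff_infix _ _).mp hisin)
  set b := (PySem.Chars.find vrocStr ((vrocGroup arg1).headD ("", "")).1.toList).toNat with hbdef
  have hbcast : ((b : Nat) : Int) = PySem.Chars.find vrocStr ((vrocGroup arg1).headD ("", "")).1.toList := by
    rw [hbdef]; omega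
  have hBalt : valid_run_of_cards_alt arg1 =
      (vrocGroup arg1).zipIdx.all (fun q =>
        q.1.1 == "A" ||
          (decide ((b : Int) + (q.2 : Int) < 24) &&
           q.1.1.toList == [(PySem.List.pyGet? vrocStr ((b : Int) + (q.2 : Int))).getD ' '])) := by
    simp only [valid_run_of_cards_alt, vroc_skip_eq]
    have hgd : arg1.dropWhile (fun c => c.1 == "A") = vrocGroup arg1 := rfl
    rw [hgd, hbcast]
  rw [vroc_A_eq arg1 hne hfnn, hBalt]
  rcases hforms with hlen1 | ⟨q0, hq0mem, hq0A, hq0not⟩ | hLtot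
  · -- all card values are single characters: both sides match the window at b
    rw [vroc_pieces_flatten b _ hlen1]
    -- the head card is non-wild, so the first character of the run is the found one
    cases hgc : vrocGroup arg1 with
    | nil => exact absurd hgc hne
    | cons c0 t =>
    have hc0A : c0.1 ≠ "A" := by
      have hh := List.head_dropWhile_not (p := fun c => c.1 == "A") (l := arg1)
        (w := by rw [show arg1.dropWhile (fun c => c.1 == "A") = vrocGroup arg1 from rfl, hgc]; simp)
      have hx : (arg1.dropWhile (fun c => c.1 == "A")).head
          (by rw [show arg1.dropWhile (fun c => c.1 == "A") = vrocGroup arg1 from rfl, hgc]; simp) = c0 := by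
        simp [show arg1.dropWhile (fun c => c.1 == "A") = vrocGroup arg1 from rfl, hgc]
      rw [hx] at hh
      simpa using hh
    have hc0len : c0.1.toList.length = 1 := hlen1 c0 (by rw [hgc]; exact List.mem_cons_self)
    have hv0 : c0.1.toList = [c0.1.toList.headD ' '] := vroc_len1_eq _ hc0len
    have hfind : PySem.Chars.find vrocStr [c0.1.toList.headD ' '] = (b : Int) := by
      rw [← hv0, hbcast, hgc]
      rfl
    have hcs0 : ((c0 :: t).zipIdx.map (vrocCh b))[0]? = some (c0.1.toList.headD ' ') := by
      simp only [List.zipIdx_cons, List.map_cons, List.getElem?_cons_zero]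
      unfold vrocCh
      rw [if_neg (by simpa using hc0A)]
    have hcsne : ((c0 :: t).zipIdx.map (vrocCh b)) ≠ [] := by simp
    have hcslen : ((c0 :: t).zipIdx.map (vrocCh b)).length = (c0 :: t).length := by simp
    have hA := vroc_main _ _ b hcsne hcs0 hfind
    rw [hcslen] at hA
    have hB := vroc_B_iff (c0 :: t) b (by simp)
      (by rw [hgc] at hwild; exact hwild) (by rw [hgc] at hlen1; exact hlen1)
    exact Bool.coe_iff_coe.mp (hA.trans hB.symm)
  · -- a non-wild card value that is no substring of the value string: both are False
    rw [PySem.Chars.isIn_eq_false_iff] at hq0not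
    have hgi : ∃ i : Nat, (vrocGroup arg1)[i]? = some q0 := by
      obtain ⟨i, hi, hq⟩ := List.getElem_of_mem hq0mem
      exact ⟨i, by rw [List.getElem?_eq_getElem hi, hq]⟩
    obtain ⟨i, hgi⟩ := hgi
    have hqz : (q0, i) ∈ (vrocGroup arg1).zipIdx := List.mk_mem_zipIdx_iff_getElem?.mpr hgi
    have hA : PySem.Chars.isIn
        (((vrocGroup arg1).zipIdx.map (vrocPiece b)).flatten) vrocStr = false := by
      rw [PySem.Chars.isIn_eq_false_iff]
      intro hinf
      apply hq0not
      have hpm : q0.1.toList ∈ ((vrocGroup arg1).zipIdx.map (vrocPiece b)) := by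
        have : vrocPiece b (q0, i) = q0.1.toList := by
          unfold vrocPiece
          rw [if_neg (by simpa using hq0A)]
        exact this ▸ List.mem_map_of_mem hqz
      exact (List.infix_of_mem_flatten hpm).trans hinf
    have hB : ((vrocGroup arg1).zipIdx.all (fun q =>
        q.1.1 == "A" ||
          (decide ((b : Int) + (q.2 : Int) < 24) &&
           q.1.1.toList == [(PySem.List.pyGet? vrocStr ((b : Int) + (q.2 : Int))).getD ' ']))) = false := by
      rw [List.all_eq_false]
      refine ⟨(q0, i), hqz, ?_⟩
      simp only [beq_iff_eq, Bool.or_eq_true, Bool.and_eq_true, decide_eq_true_eq, not_or, not_and]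
      refine ⟨hq0A, fun hlt hbeq => ?_⟩
      have hg : PySem.List.pyGet? vrocStr ((b : Int) + (i : Int)) = vrocStr[b+i]? := by
        rw [show (b : Int) + (i : Int) = ((b + i : Nat) : Int) from by push_cast; ring,
            PySem.List.pyGet?_natCast]
      have hbi : b + i < 24 := by omega
      have hsome : vrocStr[b+i]? = some (vrocStr[b+i]'(by simp [vroc_len]; omega)) :=
        List.getElem?_eq_getElem (by simp [vroc_len]; omega)
      rw [hg, hsome] at hbeq
      apply hq0not
      rw [hbeq]
      simp only [Option.getD_some]
      exact (List.singleton_infix_iff _ _).mpr (List.getElem_mem _)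
    rw [hA, hB]
  · -- the run is longer than the 24-char doubled string: both are False
    have hA : PySem.Chars.isIn
        (((vrocGroup arg1).zipIdx.map (vrocPiece b)).flatten) vrocStr = false := by
      rw [PySem.Chars.isIn_eq_false_iff]
      intro hinf
      have hlen := hinf.length_le
      rw [List.length_flatten, List.map_map] at hlen
      have hmap : ((vrocGroup arg1).zipIdx.map (List.length ∘ vrocPiece b)).sum
          = ((vrocGroup arg1).map (fun c => if c.1 = "A" then 1 else c.1.toList.length)).sum := by
        have h1 : (List.length ∘ vrocPiece b)
            = (fun q : (String × String) × Nat => if q.1.1 = "A" then 1 else q.1.1.toList.length) := by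
          funext q
          unfold vrocPiece
          by_cases hw : q.1.1 = "A" <;> simp [hw]
        rw [h1, show (fun q : (String × String) × Nat =>
              if q.1.1 = "A" then 1 else q.1.1.toList.length)
            = (fun c : String × String => if c.1 = "A" then 1 else c.1.toList.length) ∘ Prod.fst
            from rfl, ← List.map_map, List.zipIdx_map_fst 0]
      rw [hmap, vroc_len] at hlen
      omega
    have hB : ((vrocGroup arg1).zipIdx.all (fun q =>
        q.1.1 == "A" ||
          (decide ((b : Int) + (q.2 : Int) < 24) &&
           q.1.1.toList == [(PySem.List.pyGet? vrocStr ((b : Int) + (q.2 : Int))).getD ' ']))) = false := by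
      rw [List.all_eq_false]
      by_cases hml : ∃ q0 ∈ vrocGroup arg1, q0.1 ≠ "A" ∧ q0.1.toList.length ≠ 1
      · -- a malformed card itself fails B's per-card test
        obtain ⟨q0, hq0mem, hq0A, hq0len⟩ := hml
        obtain ⟨i, hi, hq⟩ := List.getElem_of_mem hq0mem
        refine ⟨(q0, i), List.mk_mem_zipIdx_iff_getElem?.mpr
          (by rw [List.getElem?_eq_getElem hi, hq]), ?_⟩
        simp only [beq_iff_eq, Bool.or_eq_true, Bool.and_eq_true, decide_eq_true_eq,
          not_or, not_and]
        refine ⟨hq0A, fun _ hbeq => ?_⟩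
        apply hq0len
        rw [hbeq]
        rfl
      · -- all values single characters: the run is longer than the window, the last card fails
        push Not at hml
        have hlen1 : ∀ c ∈ vrocGroup arg1, (if c.1 = "A" then 1 else c.1.toList.length) = 1 := by
          intro c hc
          by_cases hw : c.1 = "A"
          · simp [hw]
          · simp [hw, hml c hc hw]
        have hLn : ((vrocGroup arg1).map
            (fun c => if c.1 = "A" then 1 else c.1.toList.length)).sum
            = (vrocGroup arg1).length := by
          rw [List.map_congr_left hlen1]
          simp
        have hn : 24 < (vrocGroup arg1).length := by omega
        have hj : (vrocGroup arg1).length - 1 < (vrocGroup arg1).length := by omega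
        refine ⟨((vrocGroup arg1)[(vrocGroup arg1).length - 1], (vrocGroup arg1).length - 1),
          List.mk_mem_zipIdx_iff_getElem?.mpr (List.getElem?_eq_getElem hj), ?_⟩
        have hnw : ((vrocGroup arg1)[(vrocGroup arg1).length - 1] : String × String).1 ≠ "A" := by
          intro hw
          have := hwild _ (List.mk_mem_zipIdx_iff_getElem?.mpr (List.getElem?_eq_getElem hj)) hw
          omega
        simp only [beq_iff_eq, Bool.or_eq_true, Bool.and_eq_true, decide_eq_true_eq,
          not_or, not_and]
        exact ⟨hnw, fun hlt => absurd hlt (by omega)⟩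
    rw [hA, hB]
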